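-- pv_equiv track=rewrite | github.com/ElchaabiMohamed/InferCode_SVM | Du-42487-python-files/program_41934.py | weird_case
-- ===== SOURCE A (Python) =====
-- def weird_case(n):
-- 	line = n.strip('\n').split(' ')
-- 	i = 0
-- 	while i < len(line):
-- 		word = line[i]
-- 		x = 0
-- 		while x < len(word):
-- 			return word[x].lower()
-- 			x = x + 1
-- 		i = i + 1
-- ===== SOURCE B (Python) =====
-- def weird_case(n):
--     t = n.strip('\n').lstrip(' ')
--     if t:
--         return t[0].lower()
--     return None
-- ===== Notes on version B (the rewrite author's own statement) =====
-- stated objective: simpler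
-- what changed: Replaces the split-by-space plus two nested index loops with a single left-strip of spaces (the empty words A skips are exactly the leading spaces) followed by one index and lower.
import Mathlib
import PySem

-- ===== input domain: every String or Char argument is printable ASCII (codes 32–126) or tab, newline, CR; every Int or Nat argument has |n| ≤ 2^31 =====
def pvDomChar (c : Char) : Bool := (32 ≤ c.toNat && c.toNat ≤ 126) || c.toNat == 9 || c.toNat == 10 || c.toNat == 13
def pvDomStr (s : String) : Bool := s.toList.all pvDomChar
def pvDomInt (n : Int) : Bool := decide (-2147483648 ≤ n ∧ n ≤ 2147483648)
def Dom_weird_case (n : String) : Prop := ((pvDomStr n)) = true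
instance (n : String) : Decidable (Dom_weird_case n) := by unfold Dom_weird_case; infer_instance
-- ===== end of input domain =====

-- B replaces A's split-by-space plus nested index loops with one lstrip(' ') and a single index (simpler).


-- ===== PORT A =====
-- the two nested while loops of A: scan the tokens; an empty token never enters the
-- inner loop; a nonempty token returns word[0].lower() at x = 0
def weirdGoA : List (List Char) → Option String
  | [] => none
  | w :: rest =>
    match w with
    | [] => weirdGoA rest
    | c :: _ => some (String.ofList [PySem.Chars.lowerChar c])

-- line = n.strip('\n').split(' '); the separator ' ' is a nonempty literal, so split cannot
-- raise and Chars.splitOn is exactly split?'s sep ≠ '' form (tokens kept as lists of chars)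
def weird_case (n : String) : Option String :=
  weirdGoA (PySem.Chars.splitOn (PySem.Chars.stripChars n.toList ['\n']) [' '])

-- ===== PORT B =====
-- t = n.strip('\n').lstrip(' '); lstrip(' ') strips exactly the space character, which is
-- dropWhile (· == ' '); t[0].lower() on the 1-char string is lowerChar of the head
def weird_case_alt (n : String) : Option String :=
  match List.dropWhile (· == ' ') (PySem.Chars.stripChars n.toList ['\n']) with
  | [] => none
  | c :: _ => some (String.ofList [PySem.Chars.lowerChar c])

-- ===== PRECONDITION & SPEC =====
def Spec_weird_case (n : String) (out : Option String) : Prop := out = weird_case_alt n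
instance (n : String) (out : Option String) : Decidable (Spec_weird_case n out) := by unfold Spec_weird_case; infer_instance

-- ===== CLAIM (what is proved, stated in full; the proofs are below) =====
def Claim_equal_weird_case : Prop := ∀ (n : String), Dom_weird_case n → Spec_weird_case n (weird_case n)

-- ===== LEMMAS AND PROOFS =====

-- a direct structural form of split-by-one-space, used only to characterise Chars.splitOn
def mySplit : List Char → List Char → List (List Char)
  | [], cur => [cur.reverse]
  | c :: rest, cur =>
    if c == ' ' then cur.reverse :: mySplit rest []
    else mySplit rest (c :: cur)

theorem go_eq_mySplit (cs : List Char) : ∀ (fuel : Nat) (cur : List Char) (acc : List (List Char)),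
    cs.length < fuel →
    PySem.Chars.splitOn.go [' '] fuel cs cur acc = acc.reverse ++ mySplit cs cur := by
  induction cs with
  | nil =>
    intro fuel cur acc h
    match fuel with
    | f + 1 =>
      rw [PySem.Chars.splitOn.go.eq_def]
      simp [mySplit]
  | cons c rest ih =>
    intro fuel cur acc h
    match fuel with
    | f + 1 =>
      rw [PySem.Chars.splitOn.go.eq_def]
      by_cases hc : c = ' '
      · subst hc
        have hp : ([' '].isPrefixOf (' ' :: rest)) = true := by simp [List.isPrefixOf]
        simp only [hp, if_pos]
        have := ih f [] (cur.reverse :: acc) (Nat.lt_of_succ_lt_succ h)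
        simp [this, mySplit]
      · have hp : ([' '].isPrefixOf (c :: rest)) = false := by
          simp [List.isPrefixOf]; exact fun h' => hc h'.symm
        simp only [hp, Bool.false_eq_true, if_neg, not_false_iff]
        have := ih f (c :: cur) acc (Nat.lt_of_succ_lt_succ h)
        simp [this, mySplit, hc]

theorem splitOn_eq_mySplit (cs : List Char) :
    PySem.Chars.splitOn cs [' '] = mySplit cs [] := by
  have := go_eq_mySplit cs (cs.length + 1) [] [] (Nat.lt_succ_self _)
  simpa [PySem.Chars.splitOn] using this

theorem mySplit_head_nonempty : ∀ (rest cur : List Char) (c : Char),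
    ∃ t ts, mySplit rest (c :: cur) = (t :: ts) ∧ ∃ u, t = cur.reverse ++ c :: u := by
  intro rest
  induction rest with
  | nil => intro cur c; exact ⟨cur.reverse ++ [c], [], by simp [mySplit], [], by simp⟩
  | cons d rest ih =>
    intro cur c
    by_cases hd : d = ' '
    · subst hd; exact ⟨cur.reverse ++ [c], mySplit rest [], by simp [mySplit], [], by simp⟩
    · obtain ⟨t, ts, ht, u, hu⟩ := ih (c :: cur) d
      refine ⟨t, ts, by simp [mySplit, hd, ht], d :: u, by simp [hu]⟩

theorem weirdGoA_mySplit (cs : List Char) :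
    weirdGoA (mySplit cs []) =
      match List.dropWhile (· == ' ') cs with
      | [] => none
      | c :: _ => some (String.ofList [PySem.Chars.lowerChar c]) := by
  induction cs with
  | nil => simp [mySplit, weirdGoA]
  | cons c rest ih =>
    by_cases hc : c = ' '
    · subst hc
      simpa [mySplit, weirdGoA, List.dropWhile] using ih
    · obtain ⟨t, ts, ht, u, hu⟩ := mySplit_head_nonempty rest [] c
      have hcf : (c == ' ') = false := by simp [hc]
      simp [mySplit, List.dropWhile, hcf, ht, hu, weirdGoA]

-- ===== VERDICT (by name: the statement is the Claim_ definition above) =====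
theorem weird_case_spec : Claim_equal_weird_case := by
  intro n _
  unfold Spec_weird_case weird_case weird_case_alt
  rw [splitOn_eq_mySplit, weirdGoA_mySplit]
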